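-- pv_equiv track=rewrite | github.com/HoaLD20/algo | HTChallenge1/substring.py | input_string
-- ===== SOURCE A (Python) =====
-- def input_string(input):
--     """
--     Returns the number of different substrings
--     :param input: string
--     :return: number
--     """
--     string = input
--     sublist = list(string)
--     sublistrm = list(set(sublist))
--     output = []
--     if len(sublistrm) == 1:
--         return len(string)
--     else:
--         # [(x, y) for x in [1,2,3] for y in [3,1,4] if x != y]
--         for i in range(len(sublist)):
--             for j in range(len(sublist)):
--                 if j < len(sublist) - 1 and i < j + 1:
--                     output.append(sublist[i] + sublist[j + 1])
--
--     return len(output) + len(sublistrm) + 1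
-- ===== SOURCE B (Python) =====
-- def input_string(input):
--     """
--     Returns the number of different substrings
--     :param input: string
--     :return: number
--     """
--     n = len(input)
--     d = len(set(input))
--     if d == 1:
--         return n
--     return n * (n - 1) // 2 + d + 1
-- ===== Notes on version B (the rewrite author's own statement) =====
-- stated objective: faster
-- what changed: Replaced the O(n^2) nested loop that materialises all ordered index pairs i<=j<n-1 with the closed form n*(n-1)//2, keeping the single-distinct-character special case.
import Mathlib
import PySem

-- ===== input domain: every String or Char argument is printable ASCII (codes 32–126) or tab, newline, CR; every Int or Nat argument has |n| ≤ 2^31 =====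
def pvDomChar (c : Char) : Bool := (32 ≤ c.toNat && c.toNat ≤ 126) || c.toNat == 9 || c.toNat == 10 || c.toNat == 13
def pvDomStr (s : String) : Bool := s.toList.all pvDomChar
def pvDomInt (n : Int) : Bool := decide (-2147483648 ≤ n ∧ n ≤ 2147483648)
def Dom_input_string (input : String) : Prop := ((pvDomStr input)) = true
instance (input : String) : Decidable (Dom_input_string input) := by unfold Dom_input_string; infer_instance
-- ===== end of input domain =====

-- B replaces A's O(n^2) pair-enumerating nested loop with the closed form n*(n-1)//2 (objective: faster).

-- ===== PORT A =====
def input_string (input : String) : Int :=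
  let string := input
  let sublist : List Char := string.toList
  let sublistrm : List Char := PySem.Set.ofList sublist
  if sublistrm.length = 1 then
    PySem.Str.len string
  else
    let output : List String :=
      (PySem.List.pyRange 0 (sublist.length : Int) 1).foldl (fun acc i =>
        (PySem.List.pyRange 0 (sublist.length : Int) 1).foldl (fun acc j =>
          if j < (sublist.length : Int) - 1 ∧ i < j + 1 then
            acc ++ [String.ofList [PySem.List.pyGetD sublist i ' ', PySem.List.pyGetD sublist (j + 1) ' ']]
          else acc) acc) []
    (output.length : Int) + (sublistrm.length : Int) + 1

-- ===== PORT B =====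
def input_string_alt (input : String) : Int :=
  let n : Int := PySem.Str.len input
  let d : Int := ((PySem.Set.ofList input.toList : List Char).length : Int)
  if d = 1 then n
  else PySem.Int.floordiv (n * (n - 1)) 2 + d + 1

-- ===== PRECONDITION & SPEC =====
def Spec_input_string (input : String) (out : Int) : Prop := out = input_string_alt input
instance (input : String) (out : Int) : Decidable (Spec_input_string input out) := by unfold Spec_input_string; infer_instance

-- ===== CLAIM (what is proved, stated in full; the proofs are below) =====
def Claim_equal_input_string : Prop := ∀ (input : String), Dom_input_string input → Spec_input_string input (input_string input)

-- ===== LEMMAS AND PROOFS =====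

-- conditional-append fold with a Prop condition, bridged to PySem.List.foldl_append_if
lemma fold_if_prop {α β : Type} (P : α → Prop) [DecidablePred P] (f : α → β)
    (l : List α) (acc : List β) :
    l.foldl (fun acc x => if P x then acc ++ [f x] else acc) acc
      = acc ++ (l.filter (fun x => decide (P x))).map f := by
  have h := PySem.List.foldl_append_if (fun x => decide (P x)) f l acc
  simpa using h

-- count of b < m with a ≤ b among range n
lemma countP_range_band (a m n : ℕ) :
    (List.range n).countP (fun b : ℕ => decide (a ≤ b ∧ b < m)) = min m n - a := by
  induction n with
  | zero => simp
  | succ n ih =>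
    rw [List.range_succ, List.countP_append, ih]
    by_cases h : a ≤ n ∧ n < m
    · rw [List.countP_cons]; simp only [List.countP_nil, decide_eq_true_eq]
      rw [if_pos h]; omega
    · rw [List.countP_cons]; simp only [List.countP_nil, decide_eq_true_eq]
      rw [if_neg h]; omega

-- the inner loop's count, for an outer index a < n
lemma inner_count (n a : ℕ) (ha : a < n) :
    List.countP
        (fun b : ℕ => decide ((b : Int) < (n : Int) - 1 ∧ (a : Int) < (b : Int) + 1))
        (List.range n)
      = n - 1 - a := by
  have hc : List.countP
        (fun b : ℕ => decide ((b : Int) < (n : Int) - 1 ∧ (a : Int) < (b : Int) + 1))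
        (List.range n)
      = List.countP (fun b : ℕ => decide (a ≤ b ∧ b < n - 1)) (List.range n) := by
    apply List.countP_congr
    intro b hb
    simp only [decide_eq_true_eq]
    have hbn : b < n := List.mem_range.mp hb
    constructor <;> intro h <;> constructor <;> omega
  rw [hc, countP_range_band]; omega

-- Gauss: sum over range n of (n-1-a)
lemma sum_range_sub (n : ℕ) : (∑ a ∈ Finset.range n, (n - 1 - a)) = n * (n - 1) / 2 := by
  have h1 : (∑ a ∈ Finset.range n, (n - 1 - a)) = ∑ a ∈ Finset.range n, a :=
    Finset.sum_range_reflect (fun i => i) n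
  have h2 := Finset.sum_range_id_mul_two n
  omega

-- bridge: a list-level sum over range n is the Finset sum (defeq up to a trailing + 0)
lemma list_sum_finset (n : ℕ) (f : ℕ → ℕ) :
    ((List.range n).map f).sum = ∑ i ∈ Finset.range n, f i :=
  Nat.add_zero _

-- cast of the closed form to Python's Int floor division
lemma cast_half (N : ℕ) :
    ((N * (N - 1) / 2 : ℕ) : Int) = PySem.Int.floordiv ((N : Int) * ((N : Int) - 1)) 2 := by
  cases N with
  | zero => decide
  | succ m =>
    have h1 : ((m+1 : ℕ) : Int) * (((m+1 : ℕ) : Int) - 1) = (((m+1) * m : ℕ) : Int) := by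
      push_cast; ring
    rw [h1, show ((2:Int)) = ((2:ℕ):Int) from rfl, PySem.Int.floordiv_natCast]
    simp

-- the whole nested loop builds a list of length n*(n-1)/2
lemma output_length (xs : List Char) :
    ((PySem.List.pyRange 0 (xs.length : Int) 1).foldl (fun acc i =>
        (PySem.List.pyRange 0 (xs.length : Int) 1).foldl (fun acc j =>
          if j < (xs.length : Int) - 1 ∧ i < j + 1 then
            acc ++ [String.ofList [PySem.List.pyGetD xs i ' ', PySem.List.pyGetD xs (j + 1) ' ']]
          else acc) acc) ([] : List String)).length
      = xs.length * (xs.length - 1) / 2 := by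
  set n := xs.length with hn
  have hinner : ∀ (i : Int) (acc : List String),
      (PySem.List.pyRange 0 (n : Int) 1).foldl (fun acc j =>
          if j < (n : Int) - 1 ∧ i < j + 1 then
            acc ++ [String.ofList [PySem.List.pyGetD xs i ' ', PySem.List.pyGetD xs (j + 1) ' ']]
          else acc) acc
        = acc ++ ((PySem.List.pyRange 0 (n : Int) 1).filter
              (fun j => decide (j < (n : Int) - 1 ∧ i < j + 1))).map
            (fun j => String.ofList [PySem.List.pyGetD xs i ' ', PySem.List.pyGetD xs (j + 1) ' ']) := by
    intro i acc
    exact fold_if_prop (fun j => j < (n : Int) - 1 ∧ i < j + 1) _ _ acc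
  calc ((PySem.List.pyRange 0 (n : Int) 1).foldl (fun acc i =>
        (PySem.List.pyRange 0 (n : Int) 1).foldl (fun acc j =>
          if j < (n : Int) - 1 ∧ i < j + 1 then
            acc ++ [String.ofList [PySem.List.pyGetD xs i ' ', PySem.List.pyGetD xs (j + 1) ' ']]
          else acc) acc) ([] : List String)).length
      = ((PySem.List.pyRange 0 (n : Int) 1).foldl (fun acc i => acc ++
          ((PySem.List.pyRange 0 (n : Int) 1).filter
              (fun j => decide (j < (n : Int) - 1 ∧ i < j + 1))).map
            (fun j => String.ofList [PySem.List.pyGetD xs i ' ', PySem.List.pyGetD xs (j + 1) ' '])) ([] : List String)).length := by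
        congr 1
        apply PySem.List.foldl_congr_mem
        intro acc i _
        exact hinner i acc
    _ = xs.length * (xs.length - 1) / 2 := by
        rw [PySem.List.foldl_append_eq_flatMap]
        simp only [List.nil_append, List.length_flatMap, List.length_map,
          ← List.countP_eq_length_filter]
        rw [PySem.List.pyRange_one]
        simp only [sub_zero, Int.toNat_natCast, List.map_map, List.countP_map,
          Function.comp_def, zero_add]
        rw [list_sum_finset]
        rw [Finset.sum_congr rfl (fun a ha => inner_count n a (Finset.mem_range.mp ha))]
        exact sum_range_sub n

-- ===== VERDICT (by name: the statement is the Claim_ definition above) =====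
theorem input_string_spec : Claim_equal_input_string := by
  intro input _
  show input_string input = input_string_alt input
  simp only [input_string, input_string_alt]
  by_cases hd : (PySem.Set.ofList input.toList : List Char).length = 1
  · rw [if_pos hd, if_pos (by exact_mod_cast hd)]
  · rw [if_neg hd, if_neg (by exact_mod_cast hd)]
    rw [output_length input.toList, PySem.Str.len_eq, cast_half]
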